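-- pv_equiv track=rewrite | github.com/dgg32/cg_sam_stats | helper_function.py | format_triplet_mutations
-- ===== SOURCE A (Python) =====
-- def format_triplet_mutations(triplet_mutations):
--     header = "X--\t-X-\t--X\tSubset"
--
--     for position in range(3):
--
--         for alphabet in list("ACGTN"):
--             template = ["-"] * 3
--             template[position] = alphabet
--
--             header += "\t" + "".join(template)
--
--
--     content = header + "\n"
--     #content = ""
--
--     for ref_triplet in triplet_mutations:
--         line = "\t".join(list(ref_triplet))
--
--         line += "\tRead 1\t"
--
--         for position in range(3):
--             mutation_count = {}
--             for mutation in triplet_mutations[ref_triplet]: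
--                 base = mutation[position]
--
--                 if base not in mutation_count:
--                     mutation_count[base] = 0
--
--                 mutation_count[base] += triplet_mutations[ref_triplet][mutation]
--
--             #print (mutation_count)
--
--             for letter in list("ACGTN"):
--                 if letter in mutation_count:
--                     line += f"{mutation_count[letter]}\t"
--                 else:
--                     line += "0\t"
--
--
--         content += line[:-1].strip() + "\n"
--     #print ("content\n", content)
--     return content
-- ===== SOURCE B (Python) =====
-- def format_triplet_mutations(triplet_mutations):
--     letters = "ACGTN"
--     header_cells = ["X--", "-X-", "--X", "Subset"] + [
--         "-" * p + a + "-" * (2 - p) for p in range(3) for a in letters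
--     ]
--     lines = ["\t".join(header_cells)]
--     for ref_triplet, muts in triplet_mutations.items():
--         c0, c1, c2 = {}, {}, {}
--         for mutation, n in muts.items():
--             c0[mutation[0]] = c0.get(mutation[0], 0) + n
--             c1[mutation[1]] = c1.get(mutation[1], 0) + n
--             c2[mutation[2]] = c2.get(mutation[2], 0) + n
--         cells = list(ref_triplet) + ["Read 1"] + [
--             str(c.get(a, 0)) for c in (c0, c1, c2) for a in letters
--         ]
--         lines.append("\t".join(cells).strip())
--     return "\n".join(lines) + "\n"
-- ===== Notes on version B (the rewrite author's own statement) =====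
-- stated objective: alternative
-- what changed: B makes a single pass over each triplet's mutation dict maintaining three position count dicts at once (instead of A's three re-scans per row), and assembles the output by joining cells with tabs and lines with newlines instead of A's trailing-tab accumulation followed by slicing and stripping.
import Mathlib
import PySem

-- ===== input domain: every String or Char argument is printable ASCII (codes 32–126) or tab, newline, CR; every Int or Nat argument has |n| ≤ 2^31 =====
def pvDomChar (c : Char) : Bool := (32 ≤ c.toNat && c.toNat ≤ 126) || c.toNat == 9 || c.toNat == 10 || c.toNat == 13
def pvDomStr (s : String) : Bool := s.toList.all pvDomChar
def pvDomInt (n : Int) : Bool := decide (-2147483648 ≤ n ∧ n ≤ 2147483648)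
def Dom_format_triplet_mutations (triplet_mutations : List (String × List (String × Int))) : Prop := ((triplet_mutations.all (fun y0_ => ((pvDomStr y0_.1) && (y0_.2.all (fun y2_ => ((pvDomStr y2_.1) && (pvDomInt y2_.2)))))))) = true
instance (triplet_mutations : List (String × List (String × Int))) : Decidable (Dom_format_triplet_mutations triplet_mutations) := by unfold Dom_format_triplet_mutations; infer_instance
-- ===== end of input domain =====

-- B builds each row in ONE pass over the mutations (three count dicts at once) and assembles the
-- output by joining cells with '\t' and lines with '\n', instead of A's three re-scans of the
-- mutation dict per row and its trailing-tab-then-slice-then-strip line assembly.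

-- ===== PORT A =====
-- string state is carried as List Char (PySem.Chars is the definition layer for Python str); String.mk at the end
def format_triplet_mutations (triplet_mutations : List (String × List (String × Int))) : String :=
  let header0 := "X--\t-X-\t--X\tSubset".toList
  let header := (PySem.List.pyRange 0 3 1).foldl (fun h position =>
      ("ACGTN".toList).foldl (fun h alphabet =>
        h ++ ('\t' :: PySem.Chars.join [] ((List.replicate 3 ['-']).set position.toNat [alphabet]))) h)
    header0
  let d := PySem.Dict.ofList triplet_mutations
  let content := header ++ ['\n']
  let content := d.items.foldl (fun content kv =>
      let ref_triplet := kv.1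
      let muts := PySem.Dict.ofList ((d.get? ref_triplet).getD [])   -- triplet_mutations[ref_triplet]
      let line := PySem.Chars.join ['\t'] (ref_triplet.toList.map (fun c => [c]))
      let line := line ++ "\tRead 1\t".toList
      let line := (PySem.List.pyRange 0 3 1).foldl (fun line position =>
          let mc : PySem.Dict Char Int := muts.items.foldl (fun mc mv =>
              -- mutation[position]: none = IndexError, excluded by Pre_
              let base := (PySem.List.pyGet? mv.1.toList position).getD ' '
              let mc' := if mc.contains base then mc else mc.insert base 0
              mc'.insert base (mc'.getD base 0 + (muts.get? mv.1).getD 0)) PySem.Dict.empty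
          ("ACGTN".toList).foldl (fun line letter =>
              if mc.contains letter then line ++ PySem.Int.toChars (mc.getD letter 0) ++ ['\t']
              else line ++ "0\t".toList) line)
        line
      content ++ PySem.Chars.strip (PySem.List.slice line none (some (-1))) ++ ['\n'])
    content
  String.ofList content

-- ===== PORT B =====
def format_triplet_mutations_alt (triplet_mutations : List (String × List (String × Int))) : String :=
  let letters := "ACGTN".toList
  let headerCells := ["X--".toList, "-X-".toList, "--X".toList, "Subset".toList] ++
    (PySem.List.pyRange 0 3 1).flatMap (fun p => letters.map (fun a =>
      List.replicate p.toNat '-' ++ [a] ++ List.replicate (2 - p).toNat '-'))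
  let lines0 := [PySem.Chars.join ['\t'] headerCells]
  let d := PySem.Dict.ofList triplet_mutations
  let lines := d.items.foldl (fun lines kv =>
      let muts := PySem.Dict.ofList kv.2
      let cs := muts.items.foldl
          (fun (cs : PySem.Dict Char Int × PySem.Dict Char Int × PySem.Dict Char Int) mv =>
            -- mutation[0]/[1]/[2]: none = IndexError, excluded by Pre_
            let b0 := (PySem.List.pyGet? mv.1.toList 0).getD ' '
            let b1 := (PySem.List.pyGet? mv.1.toList 1).getD ' '
            let b2 := (PySem.List.pyGet? mv.1.toList 2).getD ' '
            (cs.1.insert b0 (cs.1.getD b0 0 + mv.2),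
             cs.2.1.insert b1 (cs.2.1.getD b1 0 + mv.2),
             cs.2.2.insert b2 (cs.2.2.getD b2 0 + mv.2)))
          (PySem.Dict.empty, PySem.Dict.empty, PySem.Dict.empty)
      let cells := kv.1.toList.map (fun c => [c]) ++ ["Read 1".toList] ++
        ([cs.1, cs.2.1, cs.2.2].flatMap (fun c => letters.map (fun a => PySem.Int.toChars (c.getD a 0))))
      lines ++ [PySem.Chars.strip (PySem.Chars.join ['\t'] cells)])
    lines0
  String.ofList (PySem.Chars.join ['\n'] lines ++ ['\n'])

-- ===== PRECONDITION & SPEC =====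
-- Pre_ excludes exactly the inputs where Python A raises IndexError: a mutation key of fewer than
-- 3 characters somewhere in the (duplicate-collapsed) dict; on those inputs B raises as well.
def Pre_format_triplet_mutations (triplet_mutations : List (String × List (String × Int))) : Prop :=
  ∀ p ∈ (PySem.Dict.ofList triplet_mutations).items, ∀ q ∈ p.2, 3 ≤ q.1.toList.length
instance (triplet_mutations : List (String × List (String × Int))) : Decidable (Pre_format_triplet_mutations triplet_mutations) := by unfold Pre_format_triplet_mutations; infer_instance

def pvWitness_format_triplet_mutations : (List (String × List (String × Int))) :=
  [("ACG", [("AAA", 2), ("TCG", 1)])]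

def Spec_format_triplet_mutations (triplet_mutations : List (String × List (String × Int))) (out : String) : Prop := out = format_triplet_mutations_alt triplet_mutations
instance (triplet_mutations : List (String × List (String × Int))) (out : String) : Decidable (Spec_format_triplet_mutations triplet_mutations out) := by unfold Spec_format_triplet_mutations; infer_instance

-- ===== CLAIM (what is proved, stated in full; the proofs are below) =====
def Claim_equal_format_triplet_mutations : Prop := ∀ (triplet_mutations : List (String × List (String × Int))), Dom_format_triplet_mutations triplet_mutations → Pre_format_triplet_mutations triplet_mutations → Spec_format_triplet_mutations triplet_mutations (format_triplet_mutations triplet_mutations)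

-- ===== LEMMAS AND PROOFS =====

-- the count dict both programs reach for position p over one inner dict
def pvCnt (ms : List (String × Int)) (p : Int) : PySem.Dict Char Int :=
  (PySem.Dict.ofList ms).items.foldl (fun c mv =>
    c.insert ((PySem.List.pyGet? mv.1.toList p).getD ' ')
      (c.getD ((PySem.List.pyGet? mv.1.toList p).getD ' ') 0 + mv.2)) PySem.Dict.empty

-- one formatted count cell
def pvCell (c : PySem.Dict Char Int) (a : Char) : List Char := PySem.Int.toChars (c.getD a 0)

-- the 15 count cells of one row
def pvR (ms : List (String × Int)) : List Char :=
  "Read 1".toList ++ '\t' ::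
  pvCell (pvCnt ms 0) 'A' ++ '\t' :: pvCell (pvCnt ms 0) 'C' ++ '\t' :: pvCell (pvCnt ms 0) 'G' ++
    '\t' :: pvCell (pvCnt ms 0) 'T' ++ '\t' :: pvCell (pvCnt ms 0) 'N' ++ '\t' ::
  pvCell (pvCnt ms 1) 'A' ++ '\t' :: pvCell (pvCnt ms 1) 'C' ++ '\t' :: pvCell (pvCnt ms 1) 'G' ++
    '\t' :: pvCell (pvCnt ms 1) 'T' ++ '\t' :: pvCell (pvCnt ms 1) 'N' ++ '\t' ::
  pvCell (pvCnt ms 2) 'A' ++ '\t' :: pvCell (pvCnt ms 2) 'C' ++ '\t' :: pvCell (pvCnt ms 2) 'G' ++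
    '\t' :: pvCell (pvCnt ms 2) 'T' ++ '\t' :: pvCell (pvCnt ms 2) 'N'

-- A's "ensure key then +=" accumulation equals B's get-based accumulation
lemma pvCntA_eq (ms : List (String × Int)) (p : Int) :
    (PySem.Dict.ofList ms).items.foldl (fun mc mv =>
        (if mc.contains ((PySem.List.pyGet? mv.1.toList p).getD ' ') then mc
         else mc.insert ((PySem.List.pyGet? mv.1.toList p).getD ' ') 0).insert
          ((PySem.List.pyGet? mv.1.toList p).getD ' ')
          ((if mc.contains ((PySem.List.pyGet? mv.1.toList p).getD ' ') then mc
            else mc.insert ((PySem.List.pyGet? mv.1.toList p).getD ' ') 0).getD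
             ((PySem.List.pyGet? mv.1.toList p).getD ' ') 0
           + ((PySem.Dict.ofList ms).get? mv.1).getD 0))
      PySem.Dict.empty = pvCnt ms p := by
  unfold pvCnt
  apply PySem.List.foldl_congr_mem
  intro acc mv hmv
  have hv : (PySem.Dict.ofList ms).get? mv.1 = some mv.2 :=
    PySem.Dict.get?_of_mem_items _ (by simpa using hmv) (PySem.Dict.nodup_keys_ofList ms)
  rw [hv]
  by_cases h : acc.contains ((PySem.List.pyGet? mv.1.toList p).getD ' ')
  · simp [h]
  · have h' : acc.contains ((PySem.List.pyGet? mv.1.toList p).getD ' ') = false := by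
      simpa using h
    simp [h', PySem.Dict.getD_insert_self, PySem.Dict.insert_insert_self,
      PySem.Dict.getD_of_not_contains _ _ h']

-- B's single pass building three dicts is the triple of the three per-position passes
lemma pvTriple_eq (ms : List (String × Int)) :
    (PySem.Dict.ofList ms).items.foldl
        (fun (cs : PySem.Dict Char Int × PySem.Dict Char Int × PySem.Dict Char Int) mv =>
          (cs.1.insert ((PySem.List.pyGet? mv.1.toList 0).getD ' ')
             (cs.1.getD ((PySem.List.pyGet? mv.1.toList 0).getD ' ') 0 + mv.2),
           cs.2.1.insert ((PySem.List.pyGet? mv.1.toList 1).getD ' ')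
             (cs.2.1.getD ((PySem.List.pyGet? mv.1.toList 1).getD ' ') 0 + mv.2),
           cs.2.2.insert ((PySem.List.pyGet? mv.1.toList 2).getD ' ')
             (cs.2.2.getD ((PySem.List.pyGet? mv.1.toList 2).getD ' ') 0 + mv.2)))
        (PySem.Dict.empty, PySem.Dict.empty, PySem.Dict.empty)
      = (pvCnt ms 0, pvCnt ms 1, pvCnt ms 2) := by
  unfold pvCnt
  suffices h : ∀ (l : List (String × Int)) (a b c : PySem.Dict Char Int),
      l.foldl (fun cs mv =>
          (cs.1.insert ((PySem.List.pyGet? mv.1.toList 0).getD ' ')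
             (cs.1.getD ((PySem.List.pyGet? mv.1.toList 0).getD ' ') 0 + mv.2),
           cs.2.1.insert ((PySem.List.pyGet? mv.1.toList 1).getD ' ')
             (cs.2.1.getD ((PySem.List.pyGet? mv.1.toList 1).getD ' ') 0 + mv.2),
           cs.2.2.insert ((PySem.List.pyGet? mv.1.toList 2).getD ' ')
             (cs.2.2.getD ((PySem.List.pyGet? mv.1.toList 2).getD ' ') 0 + mv.2))) (a, b, c)
        = (l.foldl (fun c mv =>
              c.insert ((PySem.List.pyGet? mv.1.toList 0).getD ' ')
                (c.getD ((PySem.List.pyGet? mv.1.toList 0).getD ' ') 0 + mv.2)) a,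
           l.foldl (fun c mv =>
              c.insert ((PySem.List.pyGet? mv.1.toList 1).getD ' ')
                (c.getD ((PySem.List.pyGet? mv.1.toList 1).getD ' ') 0 + mv.2)) b,
           l.foldl (fun c mv =>
              c.insert ((PySem.List.pyGet? mv.1.toList 2).getD ' ')
                (c.getD ((PySem.List.pyGet? mv.1.toList 2).getD ' ') 0 + mv.2)) c) by
    exact h _ _ _ _
  intro l
  induction l with
  | nil => intro a b c; rfl
  | cons hd tl ih => intro a b c; simp only [List.foldl_cons]; exact ih _ _ _

-- A's letters loop appends the five cells of one position, each followed by a tab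
lemma pvBlock_eq (mc : PySem.Dict Char Int) (line : List Char) :
    ("ACGTN".toList).foldl (fun line letter =>
        if mc.contains letter then line ++ PySem.Int.toChars (mc.getD letter 0) ++ ['\t']
        else line ++ "0\t".toList) line
      = line ++ pvCell mc 'A' ++ '\t' :: pvCell mc 'C' ++ '\t' :: pvCell mc 'G' ++
          '\t' :: pvCell mc 'T' ++ '\t' :: pvCell mc 'N' ++ ['\t'] := by
  have hc : ∀ (l : List Char) (a : Char),
      (if mc.contains a then l ++ PySem.Int.toChars (mc.getD a 0) ++ ['\t']
       else l ++ "0\t".toList) = l ++ pvCell mc a ++ ['\t'] := by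
    intro l a
    unfold pvCell
    by_cases h : mc.contains a
    · simp [h]
    · have h' : mc.contains a = false := by simpa using h
      rw [if_neg (by simp [h']), PySem.Dict.getD_of_not_contains _ _ h']
      simp [show PySem.Int.toChars 0 = ['0'] from rfl,
        show "0\t".toList = ['0', '\t'] from rfl]
  simp only [show "ACGTN".toList = ['A', 'C', 'G', 'T', 'N'] from rfl,
    List.foldl_cons, List.foldl_nil, hc]
  simp [List.append_assoc]

-- join with a separator, unfolded over a cons head
lemma pvJoin_cons_flat (sep : List Char) :
    ∀ (t : List (List Char)) (h : List Char),
      PySem.Chars.join sep (h :: t) = h ++ t.flatMap (fun x => sep ++ x) := by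
  intro t
  induction t with
  | nil => intro h; simp [PySem.Chars.join_singleton]
  | cons a t ih =>
      intro h
      rw [PySem.Chars.join_cons_cons, ih a]
      simp [List.append_assoc]

-- join over a nonempty front part splits
lemma pvJoin_append_cons (sep : List Char) :
    ∀ (xs : List (List Char)) (y : List Char) (ys : List (List Char)), xs ≠ [] →
      PySem.Chars.join sep (xs ++ y :: ys)
        = PySem.Chars.join sep xs ++ sep ++ PySem.Chars.join sep (y :: ys) := by
  intro xs
  induction xs with
  | nil => intro y ys h; exact absurd rfl h
  | cons x xs ih =>
      intro y ys _
      cases xs with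
      | nil => simp [PySem.Chars.join_cons_cons, PySem.Chars.join_singleton]
      | cons x' t =>
          have ih' := ih y ys (by simp)
          simp only [List.cons_append] at ih' ⊢
          rw [PySem.Chars.join_cons_cons, ih', PySem.Chars.join_cons_cons]
          simp [List.append_assoc]

-- pulling the leading newline of each row to the back of the previous one
lemma pvFlatShift {α : Type} (c : Char) (f : α → List Char) :
    ∀ (l : List α),
      c :: l.flatMap (fun x => f x ++ [c]) = l.flatMap (fun x => c :: f x) ++ [c] := by
  intro l
  induction l with
  | nil => simp
  | cons a t ih => simp [List.flatMap_cons, List.append_assoc] at ih ⊢; simp [ih]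

-- strip swallows a leading tab
lemma pvStrip_tab (s : List Char) : PySem.Chars.strip ('\t' :: s) = PySem.Chars.strip s := by
  simp [PySem.Chars.strip, PySem.Chars.lstrip,
    show PySem.Chars.isspace '\t' = true from rfl]

-- the per-row strings of A and B agree
lemma pvRow_eq (k : String) (ms : List (String × Int)) :
    PySem.Chars.strip (PySem.List.slice
        ((PySem.List.pyRange 0 3 1).foldl (fun line position =>
            ("ACGTN".toList).foldl (fun line letter =>
                if ((PySem.Dict.ofList ms).items.foldl (fun mc mv =>
                      (if mc.contains ((PySem.List.pyGet? mv.1.toList position).getD ' ') then mc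
                       else mc.insert ((PySem.List.pyGet? mv.1.toList position).getD ' ') 0).insert
                        ((PySem.List.pyGet? mv.1.toList position).getD ' ')
                        ((if mc.contains ((PySem.List.pyGet? mv.1.toList position).getD ' ') then mc
                          else mc.insert ((PySem.List.pyGet? mv.1.toList position).getD ' ') 0).getD
                           ((PySem.List.pyGet? mv.1.toList position).getD ' ') 0
                         + ((PySem.Dict.ofList ms).get? mv.1).getD 0))
                    PySem.Dict.empty).contains letter
                then line ++ PySem.Int.toChars (((PySem.Dict.ofList ms).items.foldl (fun mc mv =>
                      (if mc.contains ((PySem.List.pyGet? mv.1.toList position).getD ' ') then mc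
                       else mc.insert ((PySem.List.pyGet? mv.1.toList position).getD ' ') 0).insert
                        ((PySem.List.pyGet? mv.1.toList position).getD ' ')
                        ((if mc.contains ((PySem.List.pyGet? mv.1.toList position).getD ' ') then mc
                          else mc.insert ((PySem.List.pyGet? mv.1.toList position).getD ' ') 0).getD
                           ((PySem.List.pyGet? mv.1.toList position).getD ' ') 0
                         + ((PySem.Dict.ofList ms).get? mv.1).getD 0))
                    PySem.Dict.empty).getD letter 0) ++ ['\t']
                else line ++ "0\t".toList) line)
          (PySem.Chars.join ['\t'] (k.toList.map (fun c => [c])) ++ "\tRead 1\t".toList))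
        none (some (-1)))
      = PySem.Chars.strip (PySem.Chars.join ['\t']
          (k.toList.map (fun c => [c]) ++ ("Read 1".toList :: [
            pvCell (pvCnt ms 0) 'A', pvCell (pvCnt ms 0) 'C', pvCell (pvCnt ms 0) 'G',
            pvCell (pvCnt ms 0) 'T', pvCell (pvCnt ms 0) 'N',
            pvCell (pvCnt ms 1) 'A', pvCell (pvCnt ms 1) 'C', pvCell (pvCnt ms 1) 'G',
            pvCell (pvCnt ms 1) 'T', pvCell (pvCnt ms 1) 'N',
            pvCell (pvCnt ms 2) 'A', pvCell (pvCnt ms 2) 'C', pvCell (pvCnt ms 2) 'G',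
            pvCell (pvCnt ms 2) 'T', pvCell (pvCnt ms 2) 'N']))) := by
  simp only [show PySem.List.pyRange 0 3 1 = [(0 : Int), 1, 2] from rfl,
    List.foldl_cons, List.foldl_nil, pvCntA_eq, pvBlock_eq]
  have hL : ((PySem.Chars.join ['\t'] (k.toList.map (fun c => [c])) ++ "\tRead 1\t".toList ++
        pvCell (pvCnt ms 0) 'A' ++ '\t' :: pvCell (pvCnt ms 0) 'C' ++ '\t' :: pvCell (pvCnt ms 0) 'G' ++
          '\t' :: pvCell (pvCnt ms 0) 'T' ++ '\t' :: pvCell (pvCnt ms 0) 'N' ++ ['\t'] ++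
        pvCell (pvCnt ms 1) 'A' ++ '\t' :: pvCell (pvCnt ms 1) 'C' ++ '\t' :: pvCell (pvCnt ms 1) 'G' ++
          '\t' :: pvCell (pvCnt ms 1) 'T' ++ '\t' :: pvCell (pvCnt ms 1) 'N' ++ ['\t'] ++
        pvCell (pvCnt ms 2) 'A' ++ '\t' :: pvCell (pvCnt ms 2) 'C' ++ '\t' :: pvCell (pvCnt ms 2) 'G' ++
          '\t' :: pvCell (pvCnt ms 2) 'T' ++ '\t' :: pvCell (pvCnt ms 2) 'N' ++ ['\t']))
      = (PySem.Chars.join ['\t'] (k.toList.map (fun c => [c])) ++ '\t' :: pvR ms) ++ ['\t'] := by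
    simp [pvR, show "\tRead 1\t".toList = '\t' :: 'R' :: 'e' :: 'a' :: 'd' :: ' ' :: '1' :: ['\t'] from rfl,
      show "Read 1".toList = 'R' :: 'e' :: 'a' :: 'd' :: ' ' :: ['1'] from rfl, List.append_assoc]
  rw [hL, PySem.List.slice_to_neg_one, List.dropLast_concat]
  have hR : PySem.Chars.join ['\t'] ("Read 1".toList :: [
        pvCell (pvCnt ms 0) 'A', pvCell (pvCnt ms 0) 'C', pvCell (pvCnt ms 0) 'G',
        pvCell (pvCnt ms 0) 'T', pvCell (pvCnt ms 0) 'N',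
        pvCell (pvCnt ms 1) 'A', pvCell (pvCnt ms 1) 'C', pvCell (pvCnt ms 1) 'G',
        pvCell (pvCnt ms 1) 'T', pvCell (pvCnt ms 1) 'N',
        pvCell (pvCnt ms 2) 'A', pvCell (pvCnt ms 2) 'C', pvCell (pvCnt ms 2) 'G',
        pvCell (pvCnt ms 2) 'T', pvCell (pvCnt ms 2) 'N']) = pvR ms := by
    simp [pvR, PySem.Chars.join_cons_cons, PySem.Chars.join_singleton,
      show "Read 1".toList = 'R' :: 'e' :: 'a' :: 'd' :: ' ' :: ['1'] from rfl, List.append_assoc]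
  cases hk : k.toList with
  | nil =>
      simp only [List.map_nil, PySem.Chars.join_nil, List.nil_append, hR]
      exact pvStrip_tab _
  | cons c t =>
      rw [pvJoin_append_cons ['\t'] ((c :: t).map (fun c => [c])) _ _ (by simp)]
      rw [hR]
      simp

set_option maxHeartbeats 1000000 in
theorem format_triplet_mutations_spec : Claim_equal_format_triplet_mutations := by
  intro tm _ _
  show format_triplet_mutations tm = format_triplet_mutations_alt tm
  simp only [format_triplet_mutations, format_triplet_mutations_alt]
  refine congrArg String.ofList ?_
  rw [PySem.List.foldl_append_singleton_eq_map]
  simp only [List.append_assoc]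
  rw [PySem.List.foldl_append_eq_flatMap]
  simp only [List.singleton_append]
  rw [pvJoin_cons_flat, List.flatMap_map]
  simp only [List.singleton_append]
  simp only [List.append_assoc]
  rw [← pvFlatShift]
  have hA : List.foldl (fun h position =>
        List.foldl (fun h alphabet =>
            h ++ '\t' :: PySem.Chars.join [] ((List.replicate 3 ['-']).set position.toNat [alphabet]))
          h "ACGTN".toList)
      "X--\t-X-\t--X\tSubset".toList (PySem.List.pyRange 0 3)
      = "X--\t-X-\t--X\tSubset\tA--\tC--\tG--\tT--\tN--\t-A-\t-C-\t-G-\t-T-\t-N-\t--A\t--C\t--G\t--T\t--N".toList := by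
    decide
  have hB : PySem.Chars.join ['\t']
        (["X--".toList, "-X-".toList, "--X".toList, "Subset".toList] ++
          List.flatMap (fun p =>
              List.map (fun a => List.replicate p.toNat '-' ++ a :: List.replicate (2 - p).toNat '-')
                "ACGTN".toList)
            (PySem.List.pyRange 0 3))
      = "X--\t-X-\t--X\tSubset\tA--\tC--\tG--\tT--\tN--\t-A-\t-C-\t-G-\t-T-\t-N-\t--A\t--C\t--G\t--T\t--N".toList := by
    decide
  rw [hA, hB]
  simp only [List.singleton_append]
  rw [List.append_right_inj]
  congr 1
  refine List.flatMap_congr ?_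
  intro kv hkv
  have hget : (PySem.Dict.ofList tm).get? kv.1 = some kv.2 :=
    PySem.Dict.get?_of_mem_items _ (by simpa using hkv) (PySem.Dict.nodup_keys_ofList tm)
  simp only [hget, Option.getD_some, pvTriple_eq]
  congr 1
  have h := pvRow_eq kv.1 kv.2
  simpa only [show "ACGTN".toList = ['A', 'C', 'G', 'T', 'N'] from rfl, List.flatMap_cons,
    List.flatMap_nil, List.map_cons, List.map_nil, List.append_nil, List.cons_append,
    List.nil_append, List.append_assoc, pvCell] using h
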